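-- pv_equiv track=rewrite | github.com/TeleAmb-upla/nieves_auto | snow_ipa/utils/utils.py | replace_values_in_dict
-- ===== SOURCE A (Python) =====
-- def replace_values_in_dict(d: dict, replacements: dict) -> dict:
--     """
--     Replace values in a dictionary based on a mapping dictionary.
--
--     Args:
--         d (dict): The original dictionary.
--         replacements (dict): A dictionary containing the replacements.
--
--     Returns:
--         dict: The updated dictionary with replaced values.
--     """
--     target_dict = d.copy()
--     for key in target_dict:
--         replacement_value = replacements.get(key, None)
--         if replacement_value:
--             target_dict[key] = replacement_value
--             continue
--
--     return target_dict
-- ===== SOURCE B (Python) =====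
-- def replace_values_in_dict(d: dict, replacements: dict) -> dict:
--     overrides = {k: v for k, v in replacements.items() if k in d and v}
--     return {**d, **overrides}
-- ===== Notes on version B (the rewrite author's own statement) =====
-- stated objective: simpler
-- what changed: Instead of copying d and looping over its keys with per-key replacement lookups, B makes one filtering pass over replacements (keeping entries whose key is in d and whose value is truthy) and merges the result with {**d, **overrides}.
import Mathlib
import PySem

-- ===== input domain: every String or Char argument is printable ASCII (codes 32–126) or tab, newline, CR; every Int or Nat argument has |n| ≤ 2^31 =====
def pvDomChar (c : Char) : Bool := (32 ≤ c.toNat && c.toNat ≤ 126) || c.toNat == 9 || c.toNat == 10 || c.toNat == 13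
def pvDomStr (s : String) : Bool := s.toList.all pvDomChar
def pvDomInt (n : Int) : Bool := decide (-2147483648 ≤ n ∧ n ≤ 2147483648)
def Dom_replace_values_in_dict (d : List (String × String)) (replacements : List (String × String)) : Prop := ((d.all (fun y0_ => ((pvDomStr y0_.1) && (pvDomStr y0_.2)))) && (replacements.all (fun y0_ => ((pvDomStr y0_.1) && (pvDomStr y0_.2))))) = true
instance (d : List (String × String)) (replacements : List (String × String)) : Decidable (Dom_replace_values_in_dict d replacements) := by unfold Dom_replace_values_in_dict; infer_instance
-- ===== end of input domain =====

-- B replaces A's copy-then-scan-d loop by the reverse decomposition: one filtering pass over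
-- `replacements` building an override dict, then a single dict merge {**d, **overrides} (objective: simpler).

-- ===== PORT A =====
-- loop body of `for key in target_dict: …` (replacement_value = replacements.get(key, None); if replacement_value: …)
def pvLoopBody (replacements : List (String × String)) (target : PySem.Dict String String) (key : String) : PySem.Dict String String :=
  match (PySem.Dict.mk replacements).get? key with
  | some v => if v = "" then target else target.insert key v
  | none => target

def replace_values_in_dict (d : List (String × String)) (replacements : List (String × String)) : List (String × String) :=
  let target := PySem.Dict.mk d
  (target.keys.foldl (pvLoopBody replacements) target).items

-- ===== PORT B =====
def replace_values_in_dict_alt (d : List (String × String)) (replacements : List (String × String)) : List (String × String) :=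
  let dd := PySem.Dict.mk d
  let overrides := PySem.Dict.ofList (replacements.filter (fun kv => dd.contains kv.1 && kv.2 ≠ ""))
  (dd.update overrides.items).items

-- ===== PRECONDITION & SPEC =====
-- Pre_ requires both association lists to have distinct keys: a Python dict can never hold a
-- duplicate key, so assoc lists with duplicate keys do not represent any input the Python A receives.
def Pre_replace_values_in_dict (d : List (String × String)) (replacements : List (String × String)) : Prop :=
  (d.map Prod.fst).Nodup ∧ (replacements.map Prod.fst).Nodup
instance (d : List (String × String)) (replacements : List (String × String)) : Decidable (Pre_replace_values_in_dict d replacements) := by unfold Pre_replace_values_in_dict; infer_instance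

def pvWitness_replace_values_in_dict : (List (String × String)) × (List (String × String)) :=
  ([("a", "1"), ("b", "2"), ("c", "3")], [("a", "x"), ("b", ""), ("z", "y")])

def Spec_replace_values_in_dict (d : List (String × String)) (replacements : List (String × String)) (out : List (String × String)) : Prop := out = replace_values_in_dict_alt d replacements
instance (d : List (String × String)) (replacements : List (String × String)) (out : List (String × String)) : Decidable (Spec_replace_values_in_dict d replacements out) := by unfold Spec_replace_values_in_dict; infer_instance

-- ===== CLAIM (what is proved, stated in full; the proofs are below) =====
def Claim_equal_replace_values_in_dict : Prop := ∀ (d : List (String × String)) (replacements : List (String × String)), Dom_replace_values_in_dict d replacements → Pre_replace_values_in_dict d replacements → Spec_replace_values_in_dict d replacements (replace_values_in_dict d replacements)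

-- ===== LEMMAS AND PROOFS =====

-- the effective replacement for key k: some w iff replacements holds a truthy value w at k
def pvRepl (r : List (String × String)) (k : String) : Option String :=
  match (PySem.Dict.mk r).get? k with
  | some v => if v = "" then none else some v
  | none => none

theorem pvLoopBody_eq (r : List (String × String)) (t : PySem.Dict String String) (k : String) :
    pvLoopBody r t k = match pvRepl r k with | some w => t.insert k w | none => t := by
  unfold pvLoopBody pvRepl
  cases h : (PySem.Dict.mk r).get? k with
  | none => rfl
  | some v => by_cases hv : v = "" <;> simp [hv]

theorem pvA_get? (r : List (String × String)) (ks : List String)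
    (t : PySem.Dict String String) (k : String) :
    (ks.foldl (pvLoopBody r) t).get? k =
      match pvRepl r k with
      | some w => if k ∈ ks then some w else t.get? k
      | none => t.get? k := by
  induction ks generalizing t with
  | nil => cases pvRepl r k <;> simp
  | cons a ks ih =>
    simp only [List.foldl_cons, ih, pvLoopBody_eq]
    cases h : pvRepl r k with
    | some w =>
      by_cases hak : k = a
      · subst hak
        simp [h, PySem.Dict.get?_insert_self]
      · cases h2 : pvRepl r a with
        | some w2 => simp [PySem.Dict.get?_insert_of_ne _ _ hak, hak]
        | none => simp [hak]
    | none =>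
      by_cases hak : k = a
      · subst hak; simp [h]
      · cases h2 : pvRepl r a with
        | some w2 => simp [PySem.Dict.get?_insert_of_ne _ _ hak]
        | none => simp

theorem pvA_keys (r : List (String × String)) (ks : List String)
    (t : PySem.Dict String String) (h : ∀ x ∈ ks, x ∈ t.keys) :
    (ks.foldl (pvLoopBody r) t).keys = t.keys := by
  induction ks generalizing t with
  | nil => rfl
  | cons a ks ih =>
    have ha : (pvLoopBody r t a).keys = t.keys := by
      rw [pvLoopBody_eq]
      cases pvRepl r a with
      | none => rfl
      | some w =>
        exact PySem.Dict.keys_insert_of_contains t w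
          ((PySem.Dict.contains_iff_mem_keys t a).mpr (h a (by simp)))
    rw [List.foldl_cons, ih _ (fun x hx => by rw [ha]; exact h x (List.mem_cons_of_mem _ hx)), ha]

theorem pvB_get? (ps : List (String × String)) (t : PySem.Dict String String) (k : String)
    (hnd : (ps.map Prod.fst).Nodup) :
    (ps.foldl (fun acc p => acc.insert p.1 p.2) t).get? k =
      match ps.find? (fun p => p.1 == k) with
      | some p => some p.2
      | none => t.get? k := by
  induction ps generalizing t with
  | nil => simp
  | cons a ps ih =>
    simp only [List.map_cons, List.nodup_cons] at hnd
    rw [List.foldl_cons, ih _ hnd.2]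
    by_cases hak : a.1 = k
    · subst hak
      have hn : ps.find? (fun p => p.1 == a.1) = none := by
        rw [List.find?_eq_none]
        intro p hp hbeq
        exact hnd.1 (by rw [← eq_of_beq hbeq]; exact List.mem_map_of_mem hp)
      simp [hn, PySem.Dict.get?_insert_self]
    · have hb : (a.1 == k) = false := beq_false_of_ne hak
      cases h2 : ps.find? (fun p => p.1 == k) with
      | some p => simp [hb, h2]
      | none => simp [hb, h2, PySem.Dict.get?_insert_of_ne _ _ (Ne.symm hak)]

theorem pvB_keys (ps : List (String × String)) (t : PySem.Dict String String)
    (h : ∀ p ∈ ps, p.1 ∈ t.keys) :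
    (ps.foldl (fun acc p => acc.insert p.1 p.2) t).keys = t.keys := by
  induction ps generalizing t with
  | nil => rfl
  | cons a ps ih =>
    have ha : (t.insert a.1 a.2).keys = t.keys :=
      PySem.Dict.keys_insert_of_contains t a.2
        ((PySem.Dict.contains_iff_mem_keys t a.1).mpr (h a (by simp)))
    rw [List.foldl_cons, ih _ (fun p hp => by rw [ha]; exact h p (List.mem_cons_of_mem _ hp)), ha]

theorem pvFind_filter (dd : PySem.Dict String String) (r : List (String × String)) (k : String)
    (hr : (r.map Prod.fst).Nodup) (hk : dd.contains k = true) :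
    (r.filter (fun kv => dd.contains kv.1 && kv.2 ≠ "")).find? (fun p => p.1 == k) =
      (pvRepl r k).map (fun w => (k, w)) := by
  induction r with
  | nil => simp [pvRepl, PySem.Dict.get?]
  | cons a r ih =>
    obtain ⟨a1, a2⟩ := a
    simp only [List.map_cons, List.nodup_cons] at hr
    by_cases hak : a1 = k
    · subst hak
      have htail : ∀ q : String × String → Bool, (r.filter q).find? (fun p => p.1 == a1) = none := by
        intro q
        rw [List.find?_eq_none]
        intro p hp hbeq
        exact hr.1 (by rw [← eq_of_beq hbeq]; exact List.mem_map_of_mem (List.mem_of_mem_filter hp))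
      have hrepl : pvRepl ((a1, a2) :: r) a1 = if a2 = "" then none else some a2 := by
        simp [pvRepl, PySem.Dict.get?]
      by_cases hv : a2 = ""
      · rw [hrepl]
        simp [hv, htail]
      · simp only [List.filter_cons, hk]
        simp [hv, hrepl]
    · have hrepl : pvRepl ((a1, a2) :: r) k = pvRepl r k := by
        simp [pvRepl, PySem.Dict.get?, beq_false_of_ne hak]
      rw [hrepl, ← ih hr.2]
      rw [List.filter_cons]
      split
      · rw [List.find?_cons]
        simp [beq_false_of_ne hak]
      · rfl

theorem pvOfList_items (ps : List (String × String)) (hnd : (ps.map Prod.fst).Nodup) :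
    (PySem.Dict.ofList ps).items = ps := by
  have := PySem.Dict.items_foldl_insert_fresh (l := ps) (k := Prod.fst) (v := Prod.snd)
    (d := (PySem.Dict.empty : PySem.Dict String String))
    (by intro a _; rfl) hnd
  simpa [PySem.Dict.ofList, PySem.Dict.update, PySem.Dict.empty] using this

-- ===== VERDICT (by name: the statement is the Claim_ definition above) =====
theorem replace_values_in_dict_spec : Claim_equal_replace_values_in_dict := by
  intro d r _ hpre
  obtain ⟨hd, hr⟩ := hpre
  unfold Spec_replace_values_in_dict
  simp only [replace_values_in_dict, replace_values_in_dict_alt, PySem.Dict.update]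
  have hfltnd : ((r.filter (fun kv => (PySem.Dict.mk d).contains kv.1 && kv.2 ≠ "")).map Prod.fst).Nodup :=
    List.Nodup.sublist (List.Sublist.map Prod.fst List.filter_sublist) hr
  rw [pvOfList_items _ hfltnd]
  have hknd : (PySem.Dict.mk d).keys.Nodup := hd
  have hAkeys : (((PySem.Dict.mk d).keys).foldl (pvLoopBody r) (PySem.Dict.mk d)).keys = (PySem.Dict.mk d).keys :=
    pvA_keys r _ _ (fun x hx => hx)
  have hBkeys : ((r.filter (fun kv => (PySem.Dict.mk d).contains kv.1 && kv.2 ≠ "")).foldl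
      (fun acc p => acc.insert p.1 p.2) (PySem.Dict.mk d)).keys = (PySem.Dict.mk d).keys :=
    pvB_keys _ _ (fun p hp => by
      have hcp := List.of_mem_filter hp
      rw [Bool.and_eq_true] at hcp
      exact (PySem.Dict.contains_iff_mem_keys _ p.1).mp hcp.1)
  have hval : ∀ k ∈ (PySem.Dict.mk d).keys,
      (((PySem.Dict.mk d).keys).foldl (pvLoopBody r) (PySem.Dict.mk d)).getD k "" =
      ((r.filter (fun kv => (PySem.Dict.mk d).contains kv.1 && kv.2 ≠ "")).foldl
        (fun acc p => acc.insert p.1 p.2) (PySem.Dict.mk d)).getD k "" := by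
    intro k hk
    have hck : (PySem.Dict.mk d).contains k = true :=
      (PySem.Dict.contains_iff_mem_keys _ k).mpr hk
    rw [PySem.Dict.getD, PySem.Dict.getD, pvA_get? r _ _ k, pvB_get? _ _ k hfltnd,
      pvFind_filter (PySem.Dict.mk d) r k hr hck]
    cases pvRepl r k with
    | none => rfl
    | some w =>
      have hk' : k ∈ List.map (fun x => x.1) d := hk
      simp [hk']
  rw [PySem.Dict.items_eq_map_keys _ (by rw [hAkeys]; exact hknd) "",
    PySem.Dict.items_eq_map_keys _ (by rw [hBkeys]; exact hknd) "",
    hAkeys, hBkeys]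
  exact List.map_congr_left (fun k hk => by rw [hval k hk])
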